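-- pv_equiv track=rewrite | github.com/codemo1991/nanobot-webui | nanobot/providers/discovery.py | _infer_quality_rank
-- ===== SOURCE A (Python) =====
-- def _infer_quality_rank(model_id: str) -> int:
--     """Infer quality rank from model ID (1=best, 10=worst)."""
--     model_lower = model_id.lower()
--     if any(x in model_lower for x in ["opus", "o1", "o3", "pro"]):
--         return 1
--     if any(x in model_lower for x in ["sonnet", "gpt-4o", "4o"]):
--         return 3
--     if any(x in model_lower for x in ["haiku", "mini", "flash"]):
--         return 6
--     return 5
-- ===== SOURCE B (Python) =====
-- _RANKS = {
--     "opus": 1, "o1": 1, "o3": 1, "pro": 1,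
--     "sonnet": 3, "gpt-4o": 3, "4o": 3,
--     "haiku": 6, "mini": 6, "flash": 6,
-- }
--
-- def _infer_quality_rank(model_id: str) -> int:
--     """Infer quality rank from model ID (1=best, 10=worst)."""
--     model_lower = model_id.lower()
--     matched = [rank for kw, rank in _RANKS.items() if kw in model_lower]
--     return min(matched) if matched else 5
-- ===== Notes on version B (the rewrite author's own statement) =====
-- stated objective: alternative
-- what changed: Replaces A's prioritized early-return tier checks with a flat keyword-to-rank map; B collects the ranks of ALL matching keywords and returns their minimum (default 5), which coincides with A because A's tier order is increasing in rank.
import Mathlib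
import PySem

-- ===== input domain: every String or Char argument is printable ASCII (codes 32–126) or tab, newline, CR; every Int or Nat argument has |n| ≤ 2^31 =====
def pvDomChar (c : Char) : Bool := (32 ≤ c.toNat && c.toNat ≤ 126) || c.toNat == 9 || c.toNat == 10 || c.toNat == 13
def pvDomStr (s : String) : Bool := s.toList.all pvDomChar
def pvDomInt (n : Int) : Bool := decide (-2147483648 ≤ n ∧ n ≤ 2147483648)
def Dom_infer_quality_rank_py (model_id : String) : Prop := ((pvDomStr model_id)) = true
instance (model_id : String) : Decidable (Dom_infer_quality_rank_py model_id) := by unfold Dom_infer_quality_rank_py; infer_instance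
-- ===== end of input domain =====

-- B replaces A's prioritized early-return tier checks with a flat keyword->rank map aggregated by min (default 5); equal because tier order is increasing in rank (alternative, same cost).


-- ===== PORT A =====
def infer_quality_rank_py (model_id : String) : Int :=
  let model_lower := PySem.Str.lower model_id
  if (["opus", "o1", "o3", "pro"] : List String).any (fun x => PySem.Str.isIn x model_lower) then 1
  else if (["sonnet", "gpt-4o", "4o"] : List String).any (fun x => PySem.Str.isIn x model_lower) then 3
  else if (["haiku", "mini", "flash"] : List String).any (fun x => PySem.Str.isIn x model_lower) then 6
  else 5

-- ===== PORT B =====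
-- flat keyword -> rank association list (insertion order), as in Source B
def pvRanks : List (String × Int) :=
  [("opus", 1), ("o1", 1), ("o3", 1), ("pro", 1),
   ("sonnet", 3), ("gpt-4o", 3), ("4o", 3),
   ("haiku", 6), ("mini", 6), ("flash", 6)]

def infer_quality_rank_py_alt (model_id : String) : Int :=
  let model_lower := PySem.Str.lower model_id
  let matched := (pvRanks.filter (fun p => PySem.Str.isIn p.1 model_lower)).map Prod.snd
  match PySem.List.min? matched (fun x => x) with
  | some m => m
  | none => 5

-- ===== PRECONDITION & SPEC =====
def Spec_infer_quality_rank_py (model_id : String) (out : Int) : Prop := out = infer_quality_rank_py_alt model_id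
instance (model_id : String) (out : Int) : Decidable (Spec_infer_quality_rank_py model_id out) := by unfold Spec_infer_quality_rank_py; infer_instance

-- ===== CLAIM =====
def Claim_equal_infer_quality_rank_py : Prop := ∀ (model_id : String), Dom_infer_quality_rank_py model_id → Spec_infer_quality_rank_py model_id (infer_quality_rank_py model_id)

-- ===== LEMMAS AND PROOFS =====

-- ===== VERDICT =====
theorem infer_quality_rank_py_spec : Claim_equal_infer_quality_rank_py := by
  intro model_id _
  unfold Spec_infer_quality_rank_py infer_quality_rank_py infer_quality_rank_py_alt pvRanks
  simp only [List.any_cons, List.any_nil, List.filter_cons, List.filter_nil, Bool.or_false]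
  generalize PySem.Str.isIn "opus" (PySem.Str.lower model_id) = c1
  generalize PySem.Str.isIn "o1" (PySem.Str.lower model_id) = c2
  generalize PySem.Str.isIn "o3" (PySem.Str.lower model_id) = c3
  generalize PySem.Str.isIn "pro" (PySem.Str.lower model_id) = c4
  generalize PySem.Str.isIn "sonnet" (PySem.Str.lower model_id) = c5
  generalize PySem.Str.isIn "gpt-4o" (PySem.Str.lower model_id) = c6
  generalize PySem.Str.isIn "4o" (PySem.Str.lower model_id) = c7
  generalize PySem.Str.isIn "haiku" (PySem.Str.lower model_id) = c8
  generalize PySem.Str.isIn "mini" (PySem.Str.lower model_id) = c9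
  generalize PySem.Str.isIn "flash" (PySem.Str.lower model_id) = c10
  revert c1 c2 c3 c4 c5 c6 c7 c8 c9 c10
  decide
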